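-- pv_equiv track=rewrite | github.com/diptodey/LTE_Simulator | python_lib/tmp.py | solution
-- ===== SOURCE A (Python) =====
-- def solution(A):
--
--     if max(A) == 0:
--         return 0
--
--     p = min(A)
--
--     A = [val - p for val in A]
--
--     pivot = 0
--     for i, val in enumerate(A):
--         if val == 0 and A[pivot:i]:
--             p += solution(A[pivot:i])
--             pivot = i
--
--     if (pivot +1) < len(A):
--         p += solution(A[pivot+1: len(A)])
--
--     return p
-- ===== SOURCE B (Python) =====
-- def solution(A):
--     if max(A) == 0:
--         return 0
--     total = A[0]
--     for prev, cur in zip(A, A[1:]):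
--         if cur > prev:
--             total += cur - prev
--     return total
-- ===== Notes on version B (the rewrite author's own statement) =====
-- stated objective: faster
-- what changed: A recursively subtracts the minimum and splits the profile at zeros (repeated slicing and recursion, quadratic); B computes the stroke count in one linear pass as the first element plus the sum of positive increases, behind the same flat-profile guard.
import Mathlib
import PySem

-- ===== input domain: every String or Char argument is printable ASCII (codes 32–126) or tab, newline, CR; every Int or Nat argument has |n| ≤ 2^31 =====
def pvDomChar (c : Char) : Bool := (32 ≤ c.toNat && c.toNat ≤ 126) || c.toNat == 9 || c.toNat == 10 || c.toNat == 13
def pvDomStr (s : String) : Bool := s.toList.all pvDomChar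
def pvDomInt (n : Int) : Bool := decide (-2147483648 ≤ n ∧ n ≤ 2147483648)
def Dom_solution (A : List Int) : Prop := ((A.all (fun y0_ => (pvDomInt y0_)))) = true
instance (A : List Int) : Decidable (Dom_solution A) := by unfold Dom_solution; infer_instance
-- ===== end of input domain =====

-- B replaces A's recursive min-subtract-and-split-at-zeros scheme by one linear pass
-- (A[0] plus the sum of positive increases); equal on every nonempty list.

-- ===== PORT A =====
-- A recurses on strictly shorter slices; the port uses a fuel counter (fuel = length at the
-- top call, always ≥ the current list's length) purely to make the recursion structural.
def solutionFuel : Nat → List Int → Int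
  | 0, _ => 0
  | fuel + 1, A =>
    match PySem.List.max? A (fun y => y) with
    | none => 0          -- max([]) raises ValueError in Python; excluded by Pre_solution
    | some m =>
      if m = 0 then 0
      else
        let p := (PySem.List.min? A (fun y => y)).getD 0
        let B := A.map (fun v => v - p)
        let st := (PySem.List.enumerate B 0).foldl
          (fun (st : Int × Int) (iv : Int × Int) =>
            if iv.2 = 0 ∧ PySem.List.slice B (some st.2) (some iv.1) ≠ [] then
              (st.1 + solutionFuel fuel (PySem.List.slice B (some st.2) (some iv.1)), iv.1)
            else st) (p, 0)
        if st.2 + 1 < PySem.List.len B then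
          st.1 + solutionFuel fuel (PySem.List.slice B (some (st.2 + 1)) (some (PySem.List.len B)))
        else st.1

def solution (A : List Int) : Int := solutionFuel A.length A

-- ===== PORT B =====
def solution_alt (A : List Int) : Int :=
  match PySem.List.max? A (fun y => y) with
  | none => 0            -- max([]) raises ValueError in Python; excluded by Pre_solution
  | some m =>
    if m = 0 then 0
    else
      (A.zip (PySem.List.slice A (some 1) none)).foldl
        (fun total pc => if pc.2 > pc.1 then total + (pc.2 - pc.1) else total)
        (PySem.List.pyGetD A 0 0)

-- ===== PRECONDITION & SPEC =====
-- Pre_ excludes only the empty list, on which both programs raise ValueError (max of empty sequence).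
def Pre_solution (A : List Int) : Prop := A ≠ []
instance (A : List Int) : Decidable (Pre_solution A) := by unfold Pre_solution; infer_instance
def pvWitness_solution : List Int := [1, 0, 2]

def Spec_solution (A : List Int) (out : Int) : Prop := out = solution_alt A
instance (A : List Int) (out : Int) : Decidable (Spec_solution A out) := by unfold Spec_solution; infer_instance

-- ===== CLAIM (what is proved, stated in full; the proofs are below) =====
def Claim_equal_solution : Prop := ∀ (A : List Int), Dom_solution A → Pre_solution A → Spec_solution A (solution A)

-- ===== LEMMAS AND PROOFS =====

-- Sum of positive increases of the list, seen from a previous value.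
def rises : Int → List Int → Int
  | _, [] => 0
  | prev, x :: t => (if prev < x then x - prev else 0) + rises x t

-- Closed form: first element plus the positive increases.
def strokes : List Int → Int
  | [] => 0
  | h :: t => h + rises h t

lemma rises_map_sub (p : Int) : ∀ (t : List Int) (prev : Int),
    rises (prev - p) (t.map (fun v => v - p)) = rises prev t := by
  intro t
  induction t with
  | nil => intro prev; simp [rises]
  | cons x t ih =>
      intro prev
      simp only [List.map_cons, rises, ih]
      by_cases h : prev < x
      · rw [if_pos (by omega : prev - p < x - p), if_pos h]
        have hx : x - p - (prev - p) = x - prev := by ring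
        rw [hx]
      · rw [if_neg (by omega : ¬ prev - p < x - p), if_neg h]

lemma rises_all_zero : ∀ (t : List Int), (∀ x ∈ t, x = 0) → rises 0 t = 0 := by
  intro t
  induction t with
  | nil => intro _; simp [rises]
  | cons x t ih =>
      intro h
      have hx : x = 0 := h x (by simp)
      subst hx
      simp [rises, ih (fun y hy => h y (by simp [hy]))]

lemma rises_split (Y' : List Int) : ∀ (X : List Int) (prev : Int),
    (∀ x ∈ X, 0 ≤ x) → 0 ≤ prev →
    rises prev (X ++ 0 :: Y') = rises prev X + rises 0 Y' := by
  intro X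
  induction X with
  | nil =>
      intro prev _ hp
      simp [rises, show ¬ prev < 0 by omega]
  | cons a X ih =>
      intro prev hX hp
      simp only [List.cons_append, rises]
      rw [ih a (fun x hx => hX x (by simp [hx])) (hX a (by simp))]
      ring

lemma strokes_split (X Y' : List Int) (hne : X ≠ []) (hX : ∀ x ∈ X, 0 ≤ x) :
    strokes (X ++ 0 :: Y') = strokes X + strokes (0 :: Y') := by
  cases X with
  | nil => exact absurd rfl hne
  | cons a X =>
      simp only [List.cons_append, strokes]
      rw [rises_split Y' X a (fun x hx => hX x (by simp [hx])) (hX a (by simp))]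
      simp
      ring

lemma strokes_drop_zero (c : List Int) (hc : ∀ x ∈ c, 0 ≤ x) :
    strokes (0 :: c) = strokes c := by
  cases c with
  | nil => simp [strokes, rises]
  | cons b c =>
      have hb : 0 ≤ b := hc b (by simp)
      by_cases h : (0 : Int) < b
      · simp [strokes, rises, h]
      · have : b = 0 := by omega
        subst this
        simp [strokes, rises]

-- B's loop over zip(A, A[1:]) computes acc + rises.
lemma zip_fold : ∀ (t : List Int) (h acc : Int),
    ((h :: t).zip t).foldl
      (fun total pc => if pc.2 > pc.1 then total + (pc.2 - pc.1) else total) acc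
    = acc + rises h t := by
  intro t
  induction t with
  | nil => intro h acc; simp [rises]
  | cons x t ih =>
      intro h acc
      simp only [List.zip_cons_cons, List.foldl_cons, rises, ih]
      by_cases hlt : h < x
      · simp [hlt, gt_iff_lt]; ring
      · simp [hlt, gt_iff_lt]

-- B's port equals the closed form (guarded by the max-is-zero check).
lemma alt_eq (h : Int) (t : List Int) :
    solution_alt (h :: t) = if t.foldl max h = 0 then 0 else strokes (h :: t) := by
  unfold solution_alt
  rw [PySem.List.max?_id_cons]
  simp only [PySem.List.slice_from_one, List.tail_cons, PySem.List.pyGetD_zero_cons]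
  rw [zip_fold t h h]
  rfl

-- Proof-side names for the two stages of A's body (definitionally equal to the port's lambdas).
def loopStep (fuel : Nat) (B : List Int) : Int × Int → Int × Int → Int × Int :=
  fun st iv =>
    if iv.2 = 0 ∧ PySem.List.slice B (some st.2) (some iv.1) ≠ [] then
      (st.1 + solutionFuel fuel (PySem.List.slice B (some st.2) (some iv.1)), iv.1)
    else st

def finish (fuel : Nat) (B : List Int) (st : Int × Int) : Int :=
  if st.2 + 1 < PySem.List.len B then
    st.1 + solutionFuel fuel (PySem.List.slice B (some (st.2 + 1)) (some (PySem.List.len B)))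
  else st.1

-- The loop invariant of A's split-at-zeros pass, followed by the final slice.
lemma core (fuel : Nat)
    (ihseg : ∀ C : List Int, C ≠ [] → C.length ≤ fuel → (∀ x ∈ C, 0 ≤ x) →
      solutionFuel fuel C = strokes C)
    (B : List Int) (hpos : ∀ x ∈ B, 0 ≤ x) (hlen : B.length ≤ fuel + 1) (h0 : (0 : Int) ∈ B) :
    ∀ (suf pre : List Int) (acc : Int) (pivotN : Nat),
      B = pre ++ suf → pivotN ≤ pre.length →
      (∀ j, pivotN < j → j < pre.length → B[j]? ≠ some 0) →
      (pivotN = 0 ∨ B[pivotN]? = some 0) →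
      finish fuel B ((PySem.List.enumerate suf (pre.length : Int)).foldl
        (loopStep fuel B) (acc, (pivotN : Int)))
      = acc + strokes (B.drop pivotN) := by
  intro suf
  induction suf with
  | nil =>
      intro pre acc pivotN hB hpiv hz hpz
      have hBlen : B.length = pre.length := by rw [hB]; simp
      have hpivlt : pivotN < B.length := by
        rcases lt_or_eq_of_le (hBlen ▸ hpiv) with h | h
        · exact h
        · exfalso
          rcases hpz with h0' | hsome
          · have : B = [] := by
              have : B.length = 0 := by omega
              exact List.eq_nil_of_length_eq_zero this
            rw [this] at h0; exact (List.not_mem_nil (a := (0:Int))) h0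
          · rw [List.getElem?_eq_none_iff.mpr (by omega)] at hsome
            simp at hsome
      have hBp : B[pivotN]? = some 0 := by
        rcases hpz with h0' | hsome
        · subst h0'
          obtain ⟨j, hj, hBj⟩ := List.getElem_of_mem h0
          rcases Nat.eq_zero_or_pos j with hj0 | hjpos
          · subst hj0; rw [List.getElem?_eq_getElem hj, hBj]
          · exact absurd (by rw [List.getElem?_eq_getElem hj, hBj])
              (hz j hjpos (by omega))
        · exact hsome
      have hBget : B[pivotN]'hpivlt = 0 := by
        rw [List.getElem?_eq_getElem hpivlt] at hBp
        exact Option.some.injEq _ _ ▸ (by simpa using hBp)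
      have hdropc : B.drop pivotN = 0 :: B.drop (pivotN + 1) := by
        rw [List.drop_eq_getElem_cons hpivlt, hBget]
      rw [PySem.List.enumerate_nil, List.foldl_nil, finish]
      simp only [PySem.List.len_eq]
      by_cases hlt : pivotN + 1 < B.length
      · rw [if_pos (by exact_mod_cast hlt)]
        have hc : ((pivotN : Int) + 1) = ((pivotN + 1 : Nat) : Int) := by push_cast; ring
        rw [hc, PySem.List.slice_natCast, List.take_of_length_le (by simp)]
        have hdne : B.drop (pivotN + 1) ≠ [] := by
          apply List.ne_nil_of_length_pos; simp; omega
        rw [ihseg _ hdne (by simp; omega) (fun x hx => hpos x (List.mem_of_mem_drop hx))]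
        rw [hdropc, strokes_drop_zero _ (fun x hx => hpos x (List.mem_of_mem_drop hx))]
      · rw [if_neg (by exact_mod_cast hlt)]
        have hdnil : B.drop (pivotN + 1) = [] := List.drop_eq_nil_of_le (by omega)
        rw [hdropc, hdnil]
        simp [strokes, rises]
  | cons v suf' ih =>
      intro pre acc pivotN hB hpiv hz hpz
      have hklt : pre.length < B.length := by rw [hB]; simp
      have hkfuel : pre.length ≤ fuel := by omega
      have hslice : PySem.List.slice B (some (pivotN : Int)) (some (pre.length : Int))
          = (B.drop pivotN).take (pre.length - pivotN) := PySem.List.slice_natCast B pivotN pre.length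
      have hdropk : B.drop pre.length = v :: suf' := by rw [hB, List.drop_left]
      have henum : PySem.List.enumerate suf' ((pre.length : Int) + 1)
          = PySem.List.enumerate suf' (((pre ++ [v]).length : Nat) : Int) := by
        congr 1; simp
      have hB' : B = (pre ++ [v]) ++ suf' := by rw [hB]; simp
      rw [PySem.List.enumerate_cons, List.foldl_cons]
      by_cases hcond : v = 0 ∧ pivotN < pre.length
      · obtain ⟨hv0, hplt⟩ := hcond
        have hsegne : (B.drop pivotN).take (pre.length - pivotN) ≠ [] := by
          intro hnil
          rcases List.take_eq_nil_iff.mp hnil with h | h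
          · omega
          · have := congrArg List.length h; simp at this; omega
        have hstep : loopStep fuel B (acc, (pivotN : Int)) ((pre.length : Int), v)
            = (acc + solutionFuel fuel ((B.drop pivotN).take (pre.length - pivotN)), (pre.length : Int)) := by
          rw [loopStep]
          simp only [hslice]
          rw [if_pos ⟨hv0, hsegne⟩]
        rw [hstep]
        have hseg_eval : solutionFuel fuel ((B.drop pivotN).take (pre.length - pivotN))
            = strokes ((B.drop pivotN).take (pre.length - pivotN)) := by
          apply ihseg _ hsegne
          · rw [List.length_take]; simp; omega
          · exact fun x hx => hpos x (List.mem_of_mem_drop (List.mem_of_mem_take hx))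
        rw [hseg_eval]
        have hihz : ∀ j, pre.length < j → j < (pre ++ [v]).length → B[j]? ≠ some 0 := by
          intro j h1 h2; simp at h2; omega
        have hihp : pre.length = 0 ∨ B[pre.length]? = some 0 := by
          right
          rw [hB, List.getElem?_append_right (le_refl _)]
          simp [hv0]
        have hres := ih (pre ++ [v]) (acc + strokes ((B.drop pivotN).take (pre.length - pivotN)))
          pre.length hB' (by simp) hihz hihp
        rw [← henum] at hres
        rw [hres]
        have hsplitlist : B.drop pivotN
            = (B.drop pivotN).take (pre.length - pivotN) ++ 0 :: suf' := by
          conv_lhs => rw [← List.take_append_drop (pre.length - pivotN) (B.drop pivotN)]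
          congr 1
          rw [List.drop_drop]
          rw [show pivotN + (pre.length - pivotN) = pre.length by omega]
          rw [hdropk, hv0]
        rw [hdropk, hv0]
        have hsp : strokes (List.drop pivotN B)
            = strokes ((B.drop pivotN).take (pre.length - pivotN)) + strokes ((0 : Int) :: suf') := by
          conv_lhs => rw [hsplitlist]
          exact strokes_split _ suf' hsegne
            (fun x hx => hpos x (List.mem_of_mem_drop (List.mem_of_mem_take hx)))
        rw [hsp]
        ring
      · have hnostep : loopStep fuel B (acc, (pivotN : Int)) ((pre.length : Int), v)
            = (acc, (pivotN : Int)) := by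
          rw [loopStep]
          simp only [hslice]
          rw [if_neg]
          rintro ⟨hv0, hne⟩
          apply hcond
          refine ⟨hv0, ?_⟩
          by_contra hge
          have hpe : pivotN = pre.length := by omega
          apply hne
          rw [List.take_eq_nil_iff]
          left
          omega
        rw [hnostep]
        have hihz : ∀ j, pivotN < j → j < (pre ++ [v]).length → B[j]? ≠ some 0 := by
          intro j h1 h2
          simp at h2
          rcases Nat.lt_or_ge j pre.length with hj | hj
          · exact hz j h1 hj
          · have hje : j = pre.length := by omega
            subst hje
            rw [hB, List.getElem?_append_right (le_refl _)]
            simp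
            intro hv0
            exact hcond ⟨hv0, by omega⟩
        have hres := ih (pre ++ [v]) acc pivotN hB' (by simp; omega) hihz hpz
        rw [← henum] at hres
        exact hres

-- solutionFuel computes B's value on every nonempty list whose length fits the fuel.
lemma solutionFuel_eq : ∀ (fuel : Nat) (A : List Int), A ≠ [] → A.length ≤ fuel →
    solutionFuel fuel A = solution_alt A := by
  intro fuel
  induction fuel with
  | zero => intro A hA hlen; cases A with
      | nil => exact absurd rfl hA
      | cons h t => simp at hlen
  | succ fuel ih =>
      intro A hA hlen
      cases A with
      | nil => exact absurd rfl hA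
      | cons h t =>
        have ihseg : ∀ C : List Int, C ≠ [] → C.length ≤ fuel → (∀ x ∈ C, 0 ≤ x) →
            solutionFuel fuel C = strokes C := by
          intro C hC hl hp
          rw [ih C hC hl]
          cases C with
          | nil => exact absurd rfl hC
          | cons c u =>
            rw [alt_eq]
            by_cases hm : u.foldl max c = 0
            · rw [if_pos hm]
              have hall : ∀ x ∈ c :: u, x = 0 := by
                intro x hx
                have hle := PySem.List.le_foldl_max u c
                have h1 : x ≤ u.foldl max c := by
                  rcases List.mem_cons.mp hx with rfl | hx'
                  · exact hle.1
                  · exact hle.2 x hx'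
                have h2 : 0 ≤ x := hp x hx
                omega
              have hc0 : c = 0 := hall c (by simp)
              simp [strokes, hc0, rises_all_zero u (fun y hy => hall y (by simp [hy]))]
            · rw [if_neg hm]
        rw [alt_eq, solutionFuel, PySem.List.max?_id_cons]
        simp only []
        by_cases hm : t.foldl max h = 0
        · simp [hm]
        · rw [if_neg hm, if_neg hm]
          simp only [PySem.List.min?_id_cons, Option.getD_some]
          set p := List.foldl min h t with hpdef
          set B := List.map (fun v => v - p) (h :: t) with hBdef
          have hple : ∀ x ∈ h :: t, p ≤ x := by
            intro x hx
            have hmin := PySem.List.foldl_min_le t h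
            rcases List.mem_cons.mp hx with rfl | hx'
            · exact hmin.1
            · exact hmin.2 x hx'
          have hpos : ∀ x ∈ B, 0 ≤ x := by
            intro x hx
            rw [hBdef] at hx
            obtain ⟨y, hy, rfl⟩ := List.mem_map.mp hx
            have := hple y hy
            omega
          have h0 : (0 : Int) ∈ B := by
            have hmem : p ∈ h :: t := by
              rcases PySem.List.foldl_min_mem t h with heq | hmem'
              · rw [hpdef, heq]; simp
              · exact List.mem_cons_of_mem h hmem'
            rw [hBdef]
            exact List.mem_map.mpr ⟨p, hmem, by ring⟩
          have hlenB : B.length ≤ fuel + 1 := by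
            rw [hBdef]; simp at hlen ⊢; omega
          have hcore := core fuel ihseg B hpos hlenB h0 B [] p 0 rfl (by simp) (by simp)
            (Or.inl rfl)
          have hrhs : p + strokes (B.drop 0) = strokes (h :: t) := by
            simp only [List.drop_zero, hBdef, List.map_cons, strokes]
            rw [rises_map_sub p t h]
            ring
          exact hcore.trans hrhs

-- ===== VERDICT (by name: the statement is the Claim_ definition above) =====
theorem solution_spec : Claim_equal_solution := by
  intro A _ hpre
  unfold Spec_solution solution
  exact solutionFuel_eq A.length A hpre (le_refl _)
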